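-- pv_equiv track=rewrite | github.com/glfernandez/horsesense_pose_mvp | src/features.py | _keypoint_bases
-- ===== SOURCE A (Python) =====
-- from typing import Iterable
--
-- LIKELIHOOD_SUFFIX = "_likelihood"
--
-- X_SUFFIX = "_x"
--
-- Y_SUFFIX = "_y"
--
-- def _keypoint_bases(columns: Iterable[str]) -> list[str]:
--     cols = list(columns)
--     bases = []
--     for col in cols:
--         if col.endswith(X_SUFFIX):
--             base = col[: -len(X_SUFFIX)]
--             if f"{base}{Y_SUFFIX}" in cols and f"{base}{LIKELIHOOD_SUFFIX}" in cols:
--                 bases.append(base)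
--     return sorted(set(bases))
-- ===== SOURCE B (Python) =====
-- def _keypoint_bases(columns):
--     # One pass: group columns by stripped base, recording which of the three
--     # suffix kinds (x, y, likelihood) are present; then keep complete bases.
--     seen = {}
--     for col in columns:
--         if col.endswith("_x"):
--             base = col[:-2]
--             x, y, l = seen.get(base, (False, False, False))
--             seen[base] = (True, y, l)
--         elif col.endswith("_y"):
--             base = col[:-2]
--             x, y, l = seen.get(base, (False, False, False))
--             seen[base] = (x, True, l)
--         elif col.endswith("_likelihood"):
--             base = col[:-11]
--             x, y, l = seen.get(base, (False, False, False))
--             seen[base] = (x, y, True)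
--     return sorted(b for b, flags in seen.items() if flags == (True, True, True))
-- ===== Notes on version B (the rewrite author's own statement) =====
-- stated objective: alternative
-- what changed: Instead of scanning the full column list for the matching _y and _likelihood columns of every _x column, B makes one grouping pass building a dict base -> (has_x, has_y, has_likelihood) flags and then keeps the bases whose three flags are all set.
import Mathlib
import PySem

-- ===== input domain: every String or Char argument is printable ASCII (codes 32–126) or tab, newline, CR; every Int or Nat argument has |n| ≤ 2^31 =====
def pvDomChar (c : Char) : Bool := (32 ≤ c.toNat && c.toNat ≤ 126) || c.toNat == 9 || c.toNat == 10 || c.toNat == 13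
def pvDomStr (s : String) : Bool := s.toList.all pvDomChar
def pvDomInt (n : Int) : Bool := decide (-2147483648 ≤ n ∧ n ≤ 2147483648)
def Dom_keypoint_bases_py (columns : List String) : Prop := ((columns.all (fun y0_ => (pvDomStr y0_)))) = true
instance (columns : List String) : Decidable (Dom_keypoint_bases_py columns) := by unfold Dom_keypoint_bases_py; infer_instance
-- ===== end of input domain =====

-- B replaces A's per-_x-column rescans of the column list by one grouping pass
-- into a dict base -> (has_x, has_y, has_likelihood) followed by a filter over the dict
-- (a different algorithm of comparable measured cost).

-- ===== PORT A =====
def keypoint_bases_py (columns : List String) : List String :=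
  let cols := columns
  let bases : List String := cols.foldl (fun bases col =>
    if PySem.Str.endswith col "_x" then
      let base := PySem.Str.slice col none (some (-2))
      if cols.contains (base ++ "_y") && cols.contains (base ++ "_likelihood") then
        bases ++ [base]
      else bases
    else bases) []
  PySem.List.sorted (PySem.Set.ofList bases) (fun x => x) false

-- ===== PORT B =====
-- the body of B's 'for col in columns' loop
def kbStep (seen : PySem.Dict String (Bool × Bool × Bool)) (col : String) :
    PySem.Dict String (Bool × Bool × Bool) :=
  if PySem.Str.endswith col "_x" then
    let base := PySem.Str.slice col none (some (-2))
    let f := seen.getD base (false, false, false)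
    seen.insert base (true, f.2.1, f.2.2)
  else if PySem.Str.endswith col "_y" then
    let base := PySem.Str.slice col none (some (-2))
    let f := seen.getD base (false, false, false)
    seen.insert base (f.1, true, f.2.2)
  else if PySem.Str.endswith col "_likelihood" then
    let base := PySem.Str.slice col none (some (-11))
    let f := seen.getD base (false, false, false)
    seen.insert base (f.1, f.2.1, true)
  else seen

def keypoint_bases_py_alt (columns : List String) : List String :=
  let seen := columns.foldl kbStep PySem.Dict.empty
  PySem.List.sorted
    ((seen.items.filter (fun p => p.2 == (true, true, true))).map (fun p => p.1))
    (fun x => x) false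

-- ===== PRECONDITION & SPEC =====
def Spec_keypoint_bases_py (columns : List String) (out : List String) : Prop := out = keypoint_bases_py_alt columns
instance (columns : List String) (out : List String) : Decidable (Spec_keypoint_bases_py columns out) := by unfold Spec_keypoint_bases_py; infer_instance

-- ===== CLAIM (what is proved, stated in full; the proofs are below) =====
def Claim_equal_keypoint_bases_py : Prop := ∀ (columns : List String), Dom_keypoint_bases_py columns → Spec_keypoint_bases_py columns (keypoint_bases_py columns)

-- ===== LEMMAS AND PROOFS =====

-- if col ends with sfx (of length k > 0), stripping the last k chars and re-appending sfx gives col back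
theorem kb_strip_append (col sfx : String) (k : Nat) (hk : 0 < k)
    (hlen : sfx.toList.length = k) (h : PySem.Str.endswith col sfx = true) :
    PySem.Str.slice col none (some (-(k : Int))) ++ sfx = col := by
  rcases (PySem.Chars.endswith_iff _ _).mp ((PySem.Str.endswith_eq col sfx) ▸ h) with ⟨pre, hpre⟩
  rw [← String.toList_inj, String.toList_append]
  have hsl : (PySem.Str.slice col none (some (-(k : Int)))).toList = pre := by
    rw [PySem.Str.toList_slice, PySem.Chars.slice_eq_listSlice,
        PySem.List.slice_to_neg_natCast _ _ hk, ← hpre]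
    simp [hlen]
  rw [hsl, hpre]

theorem kb_append_strip (b sfx : String) (k : Nat) (hk : 0 < k)
    (hlen : sfx.toList.length = k) :
    PySem.Str.slice (b ++ sfx) none (some (-(k : Int))) = b := by
  rw [← String.toList_inj, PySem.Str.toList_slice, PySem.Chars.slice_eq_listSlice,
      PySem.List.slice_to_neg_natCast _ _ hk, String.toList_append]
  simp [hlen]

theorem kb_endswith_append (b sfx : String) : PySem.Str.endswith (b ++ sfx) sfx = true := by
  rw [PySem.Str.endswith_eq]
  exact (PySem.Chars.endswith_iff _ _).mpr (by rw [String.toList_append]; exact List.suffix_append _ _)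

-- specialisations to the three literal suffixes (with the numeral cast normalised)
theorem kb_strip_x (col : String) (h : PySem.Str.endswith col "_x" = true) :
    PySem.Str.slice col none (some (-2)) ++ "_x" = col := by
  have h2 := kb_strip_append col "_x" 2 (by omega) (by decide) h
  rwa [(by norm_num : -((2:Nat):Int) = (-2 : Int))] at h2

theorem kb_strip_y (col : String) (h : PySem.Str.endswith col "_y" = true) :
    PySem.Str.slice col none (some (-2)) ++ "_y" = col := by
  have h2 := kb_strip_append col "_y" 2 (by omega) (by decide) h
  rwa [(by norm_num : -((2:Nat):Int) = (-2 : Int))] at h2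

theorem kb_strip_l (col : String) (h : PySem.Str.endswith col "_likelihood" = true) :
    PySem.Str.slice col none (some (-11)) ++ "_likelihood" = col := by
  have h2 := kb_strip_append col "_likelihood" 11 (by omega) (by decide) h
  rwa [(by norm_num : -((11:Nat):Int) = (-11 : Int))] at h2

theorem kb_append_strip2 (b sfx : String) (hlen : sfx.toList.length = 2) :
    PySem.Str.slice (b ++ sfx) none (some (-2)) = b := by
  have h2 := kb_append_strip b sfx 2 (by omega) hlen
  rwa [(by norm_num : -((2:Nat):Int) = (-2 : Int))] at h2

theorem kb_append_strip11 (b : String) :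
    PySem.Str.slice (b ++ "_likelihood") none (some (-11)) = b := by
  have h2 := kb_append_strip b "_likelihood" 11 (by omega) (by decide)
  rwa [(by norm_num : -((11:Nat):Int) = (-11 : Int))] at h2

-- a string ending with sfx1 is not b ++ sfx2 when sfx1/sfx2 have different (present) last chars
theorem kb_ne_append (c b sfx1 sfx2 : String) (h : PySem.Str.endswith c sfx1 = true)
    (hl : sfx1.toList.getLast? ≠ sfx2.toList.getLast?)
    (h1 : sfx1.toList ≠ []) (h2 : sfx2.toList ≠ []) : b ++ sfx2 ≠ c := by
  rintro rfl
  rcases (PySem.Chars.endswith_iff _ _).mp ((PySem.Str.endswith_eq _ _) ▸ h) with ⟨t, ht⟩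
  apply hl
  have e1 : (b ++ sfx2).toList.getLast? = sfx1.toList.getLast? := by
    rw [← ht]; exact List.getLast?_append_of_ne_nil t h1
  have e2 : (b ++ sfx2).toList.getLast? = sfx2.toList.getLast? := by
    rw [String.toList_append]; exact List.getLast?_append_of_ne_nil _ h2
  rw [← e1, e2]

-- A's appended condition as one predicate on the column
def kbPA (cols : List String) (col : String) : Bool :=
  PySem.Str.endswith col "_x"
    && cols.contains (PySem.Str.slice col none (some (-2)) ++ "_y")
    && cols.contains (PySem.Str.slice col none (some (-2)) ++ "_likelihood")

theorem kb_basesA (columns : List String) :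
    (columns.foldl (fun bases col =>
      if PySem.Str.endswith col "_x" then
        let base := PySem.Str.slice col none (some (-2))
        if columns.contains (base ++ "_y") && columns.contains (base ++ "_likelihood") then
          bases ++ [base]
        else bases
      else bases) [])
    = (columns.filter (kbPA columns)).map (fun col => PySem.Str.slice col none (some (-2))) := by
  have hfn : (fun (bases : List String) col =>
      if PySem.Str.endswith col "_x" then
        let base := PySem.Str.slice col none (some (-2))
        if columns.contains (base ++ "_y") && columns.contains (base ++ "_likelihood") then
          bases ++ [base]
        else bases
      else bases)
    = (fun bases col => if kbPA columns col then
        bases ++ [PySem.Str.slice col none (some (-2))] else bases) := by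
    funext bases col
    simp only [kbPA, Bool.and_eq_true, and_assoc]
    split_ifs <;> tauto
  rw [hfn, PySem.List.foldl_append_if]
  simp

-- the three memberships that characterise a kept base
def kbTrip (columns : List String) (b : String) : Prop :=
  (b ++ "_x") ∈ columns ∧ (b ++ "_y") ∈ columns ∧ (b ++ "_likelihood") ∈ columns

theorem kb_mem_basesA (columns : List String) (b : String) :
    (b ∈ (columns.filter (kbPA columns)).map (fun col => PySem.Str.slice col none (some (-2))))
      ↔ kbTrip columns b := by
  simp only [List.mem_map, List.mem_filter, kbPA, Bool.and_eq_true, List.contains_iff_mem, kbTrip]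
  constructor
  · rintro ⟨col, ⟨hcol, ⟨hx, hy⟩, hl⟩, rfl⟩
    rw [kb_strip_x col hx]
    exact ⟨hcol, hy, hl⟩
  · rintro ⟨hx, hy, hl⟩
    have hstrip := kb_append_strip2 b "_x" (by decide)
    refine ⟨b ++ "_x", ⟨hx, ⟨kb_endswith_append b "_x", ?_⟩, ?_⟩, hstrip⟩
    · rw [hstrip]; exact hy
    · rw [hstrip]; exact hl

-- one step of B's loop, seen through getD
theorem kb_step_getD (d : PySem.Dict String (Bool × Bool × Bool)) (c b : String) :
    (kbStep d c).getD b (false, false, false) =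
      ((d.getD b (false, false, false)).1 || decide (b ++ "_x" = c),
       (d.getD b (false, false, false)).2.1 || decide (b ++ "_y" = c),
       (d.getD b (false, false, false)).2.2 || decide (b ++ "_likelihood" = c)) := by
  unfold kbStep
  split_ifs with hx hy hl
  · rw [PySem.Dict.getD_insert]
    by_cases hb : b = PySem.Str.slice c none (some (-2))
    · have hc : b ++ "_x" = c := by rw [hb]; exact kb_strip_x c hx
      have hny : b ++ "_y" ≠ c := kb_ne_append c b "_x" "_y" hx (by decide) (by decide) (by decide)
      have hnl : b ++ "_likelihood" ≠ c :=
        kb_ne_append c b "_x" "_likelihood" hx (by decide) (by decide) (by decide)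
      rw [if_pos hb, decide_eq_true hc, decide_eq_false hny, decide_eq_false hnl, ← hb]
      simp
    · have hnx : b ++ "_x" ≠ c := by
        intro hc
        exact hb (by rw [← hc, kb_append_strip2 b "_x" (by decide)])
      have hny : b ++ "_y" ≠ c := kb_ne_append c b "_x" "_y" hx (by decide) (by decide) (by decide)
      have hnl : b ++ "_likelihood" ≠ c :=
        kb_ne_append c b "_x" "_likelihood" hx (by decide) (by decide) (by decide)
      rw [if_neg hb, decide_eq_false hnx, decide_eq_false hny, decide_eq_false hnl]
      simp
  · rw [PySem.Dict.getD_insert]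
    by_cases hb : b = PySem.Str.slice c none (some (-2))
    · have hc : b ++ "_y" = c := by rw [hb]; exact kb_strip_y c hy
      have hnx : b ++ "_x" ≠ c := kb_ne_append c b "_y" "_x" hy (by decide) (by decide) (by decide)
      have hnl : b ++ "_likelihood" ≠ c :=
        kb_ne_append c b "_y" "_likelihood" hy (by decide) (by decide) (by decide)
      rw [if_pos hb, decide_eq_true hc, decide_eq_false hnx, decide_eq_false hnl, ← hb]
      simp
    · have hny : b ++ "_y" ≠ c := by
        intro hc
        exact hb (by rw [← hc, kb_append_strip2 b "_y" (by decide)])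
      have hnx : b ++ "_x" ≠ c := kb_ne_append c b "_y" "_x" hy (by decide) (by decide) (by decide)
      have hnl : b ++ "_likelihood" ≠ c :=
        kb_ne_append c b "_y" "_likelihood" hy (by decide) (by decide) (by decide)
      rw [if_neg hb, decide_eq_false hnx, decide_eq_false hny, decide_eq_false hnl]
      simp
  · rw [PySem.Dict.getD_insert]
    by_cases hb : b = PySem.Str.slice c none (some (-11))
    · have hc : b ++ "_likelihood" = c := by rw [hb]; exact kb_strip_l c hl
      have hnx : b ++ "_x" ≠ c :=
        kb_ne_append c b "_likelihood" "_x" hl (by decide) (by decide) (by decide)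
      have hny : b ++ "_y" ≠ c :=
        kb_ne_append c b "_likelihood" "_y" hl (by decide) (by decide) (by decide)
      rw [if_pos hb, decide_eq_true hc, decide_eq_false hnx, decide_eq_false hny, ← hb]
      simp
    · have hnl : b ++ "_likelihood" ≠ c := by
        intro hc
        exact hb (by rw [← hc, kb_append_strip11 b])
      have hnx : b ++ "_x" ≠ c :=
        kb_ne_append c b "_likelihood" "_x" hl (by decide) (by decide) (by decide)
      have hny : b ++ "_y" ≠ c :=
        kb_ne_append c b "_likelihood" "_y" hl (by decide) (by decide) (by decide)
      rw [if_neg hb, decide_eq_false hnx, decide_eq_false hny, decide_eq_false hnl]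
      simp
  · have hnx : b ++ "_x" ≠ c := fun hc => hx (hc ▸ kb_endswith_append b "_x")
    have hny : b ++ "_y" ≠ c := fun hc => hy (hc ▸ kb_endswith_append b "_y")
    have hnl : b ++ "_likelihood" ≠ c := fun hc => hl (hc ▸ kb_endswith_append b "_likelihood")
    rw [decide_eq_false hnx, decide_eq_false hny, decide_eq_false hnl]
    simp

-- B: the dict invariant
theorem kb_invB (l : List String) : ∀ (d : PySem.Dict String (Bool × Bool × Bool)) (b : String),
    (l.foldl kbStep d).getD b (false, false, false) =
      ((d.getD b (false, false, false)).1 || decide ((b ++ "_x") ∈ l),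
       (d.getD b (false, false, false)).2.1 || decide ((b ++ "_y") ∈ l),
       (d.getD b (false, false, false)).2.2 || decide ((b ++ "_likelihood") ∈ l)) := by
  induction l with
  | nil => intro d b; simp
  | cons c l ih =>
    intro d b
    rw [List.foldl_cons, ih (kbStep d c) b, kb_step_getD]
    simp [List.mem_cons, Bool.decide_or, Bool.or_assoc]

theorem kb_nodup_keysB (l : List String) : ∀ (d : PySem.Dict String (Bool × Bool × Bool)),
    d.keys.Nodup → (l.foldl kbStep d).keys.Nodup := by
  induction l with
  | nil => intro d hd; exact hd
  | cons c l ih =>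
    intro d hd
    rw [List.foldl_cons]
    apply ih
    unfold kbStep
    split_ifs <;> first | exact PySem.Dict.nodup_keys_insert _ _ _ hd | exact hd

theorem kb_mem_resB (columns : List String) (b : String) :
    (b ∈ (((columns.foldl kbStep PySem.Dict.empty).items.filter
        (fun p => p.2 == (true, true, true))).map (fun p => p.1)))
      ↔ kbTrip columns b := by
  have hnd : (columns.foldl kbStep PySem.Dict.empty).keys.Nodup :=
    kb_nodup_keysB columns _ (by simp [pysem])
  have hinv := kb_invB columns PySem.Dict.empty b
  simp only [PySem.Dict.getD_empty, Bool.false_or] at hinv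
  constructor
  · rintro hmem
    simp only [List.mem_map, List.mem_filter] at hmem
    rcases hmem with ⟨⟨k, v⟩, ⟨hkv, hv⟩, rfl⟩
    have hvt : v = (true, true, true) := by simpa using hv
    subst hvt
    have hget := PySem.Dict.getD_of_mem_items _ hkv hnd (false, false, false)
    rw [hinv] at hget
    simp only [Prod.mk.injEq, decide_eq_true_eq] at hget
    exact ⟨hget.1, hget.2.1, hget.2.2⟩
  · rintro ⟨hx, hy, hl⟩
    have hget : (columns.foldl kbStep PySem.Dict.empty).getD b (false, false, false)
        = (true, true, true) := by
      rw [hinv]; simp [hx, hy, hl]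
    have hsome : (columns.foldl kbStep PySem.Dict.empty).get? b = some (true, true, true) := by
      rcases hcase : (columns.foldl kbStep PySem.Dict.empty).get? b with _ | v
      · rw [PySem.Dict.getD_eq_get?_getD, hcase] at hget
        simp at hget
      · rw [PySem.Dict.getD_eq_get?_getD, hcase] at hget
        simp only [Option.getD_some] at hget
        rw [hget]
    have hitems := PySem.Dict.mem_items_of_get?_eq_some _ hsome
    simp only [List.mem_map, List.mem_filter]
    exact ⟨(b, (true, true, true)), ⟨hitems, by simp⟩, rfl⟩

-- ===== VERDICT (by name: the statement is the Claim_ definition above) =====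
theorem keypoint_bases_py_spec : Claim_equal_keypoint_bases_py := by
  intro columns _
  unfold Spec_keypoint_bases_py keypoint_bases_py keypoint_bases_py_alt
  apply PySem.List.sorted_eq_sorted_of_perm _ _ _ (fun a b h => h)
  apply (List.perm_ext_iff_of_nodup ?_ ?_).mpr
  · intro b
    rw [kb_basesA columns, PySem.Set.mem_ofList, kb_mem_basesA, kb_mem_resB]
  · rw [kb_basesA columns]
    exact PySem.Set.nodup_ofList _
  · have hnd : (columns.foldl kbStep PySem.Dict.empty).keys.Nodup :=
      kb_nodup_keysB columns _ (by simp [pysem])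
    simp only [PySem.Dict.keys] at hnd
    exact hnd.sublist (List.Sublist.map _ List.filter_sublist)
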